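-- pv_equiv track=rewrite | github.com/phuong27102000/NTRU_HRSS_KEM_SV | Draft_Phuong/ternary/poly.py | r2_mul
-- ===== SOURCE A (Python) =====
-- def zeros_gen(n):
--     out = [0]*n
--     return out
--
-- def r2_add(a,b,n):
-- #len(a) = len(b)
--     out = []
--     for i in range(0,n):
--         out += [a[i]^b[i]]
--     return out
--
-- def r2_mul(a,b,n):
-- #len(a) = len(b)
--     out = zeros_gen(n)
--     temp = a.copy()
--     for i in range(0,n):
--         if b[i] == 1:
--             out = r2_add(out,temp,n)
--         temp.insert(0,temp.pop())
--     return out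
-- ===== SOURCE B (Python) =====
-- def r2_mul(a, b, n):
--     # Output-centric: precompute the positions of 1s in b, then build each
--     # output coefficient directly with modular index arithmetic (no list
--     # rotation, no intermediate vector adds).
--     m = len(a)
--     ones = [i for i in range(n) if b[i] == 1]
--     out = []
--     for j in range(n):
--         acc = 0
--         for i in ones:
--             acc ^= a[(j - i) % m]
--         out.append(acc)
--     return out
-- ===== Notes on version B (the rewrite author's own statement) =====
-- stated objective: faster
-- what changed: Instead of repeatedly rotating a copy of a and XOR-adding whole vectors via a helper, B precomputes the positions of 1s in b once and builds each output coefficient directly by modular index arithmetic into a, with no list rotations or intermediate list allocations.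
import Mathlib
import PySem

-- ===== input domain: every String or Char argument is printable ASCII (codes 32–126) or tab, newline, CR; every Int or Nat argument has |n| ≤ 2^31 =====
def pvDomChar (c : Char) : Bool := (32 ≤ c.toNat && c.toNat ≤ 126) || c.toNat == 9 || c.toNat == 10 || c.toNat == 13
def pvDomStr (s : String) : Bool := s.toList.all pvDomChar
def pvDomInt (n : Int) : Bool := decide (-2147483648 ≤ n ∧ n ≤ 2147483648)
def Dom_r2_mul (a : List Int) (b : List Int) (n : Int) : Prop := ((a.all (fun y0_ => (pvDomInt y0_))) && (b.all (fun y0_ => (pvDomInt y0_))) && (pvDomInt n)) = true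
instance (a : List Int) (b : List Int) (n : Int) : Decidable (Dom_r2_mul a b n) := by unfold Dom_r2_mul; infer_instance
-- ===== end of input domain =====

-- B replaces A's rotate-a-copy-and-vector-add loop by direct per-coefficient
-- XOR accumulation over the precomputed 1-positions of b (objective: faster,
-- constant-factor; measured). Return-value equivalence only
-- (A copies its argument, neither mutates the caller's lists observably).

-- ===== PORT A =====
def zeros_gen (n : Int) : List Int := List.replicate n.toNat 0

def r2_add (a : List Int) (b : List Int) (n : Int) : List Int :=
  (PySem.List.pyRange 0 n 1).foldl
    (fun out i => out ++ [PySem.Int.bxor (PySem.List.pyGetD a i 0) (PySem.List.pyGetD b i 0)]) []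

-- loop body of A: 'if b[i]==1: out = r2_add(out,temp,n)' then
-- 'temp.insert(0, temp.pop())' (pop raises on empty temp — excluded by Pre_).
def r2Step (b : List Int) (n : Int) (s : List Int × List Int) (i : Int) : List Int × List Int :=
  let out := if PySem.List.pyGetD b i 0 == 1 then r2_add s.1 s.2 n else s.1
  let temp := (s.2.getLast?.getD 0) :: s.2.dropLast
  (out, temp)

def r2_mul (a : List Int) (b : List Int) (n : Int) : List Int :=
  ((PySem.List.pyRange 0 n 1).foldl (r2Step b n) (zeros_gen n, a)).1

-- ===== PORT B =====
def r2_mul_alt (a : List Int) (b : List Int) (n : Int) : List Int :=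
  let m : Int := (a.length : Int)
  let ones := (PySem.List.pyRange 0 n 1).filter (fun i => PySem.List.pyGetD b i 0 == 1)
  (PySem.List.pyRange 0 n 1).map (fun j =>
    ones.foldl (fun acc i =>
      PySem.Int.bxor acc (PySem.List.pyGetD a (PySem.Int.mod (j - i) m) 0)) 0)

-- ===== PRECONDITION & SPEC =====
-- Pre_ excludes exactly the inputs on which A raises: for n > 0 it needs
-- b[i] for every i < n (IndexError), a nonempty (temp.pop() raises), and,
-- when some b[i] = 1 with i < n, len(a) ≥ n (r2_add indexes temp up to n-1).
def Pre_r2_mul (a : List Int) (b : List Int) (n : Int) : Prop :=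
  n ≤ 0 ∨ (n ≤ (b.length : Int) ∧ a ≠ [] ∧ ((1:Int) ∈ b.take n.toNat → n ≤ (a.length : Int)))
instance (a : List Int) (b : List Int) (n : Int) : Decidable (Pre_r2_mul a b n) := by
  unfold Pre_r2_mul; infer_instance

def pvWitness_r2_mul : List Int × List Int × Int := ([1, 0, 1], [1, 1, 0], 3)

def Spec_r2_mul (a : List Int) (b : List Int) (n : Int) (out : List Int) : Prop := out = r2_mul_alt a b n
instance (a : List Int) (b : List Int) (n : Int) (out : List Int) : Decidable (Spec_r2_mul a b n out) := by unfold Spec_r2_mul; infer_instance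

-- ===== CLAIM (what is proved, stated in full; the proofs are below) =====
def Claim_equal_r2_mul : Prop := ∀ (a : List Int) (b : List Int) (n : Int), Dom_r2_mul a b n → Pre_r2_mul a b n → Spec_r2_mul a b n (r2_mul a b n)

-- ===== LEMMAS AND PROOFS =====

-- right rotation by one, as performed by A's 'temp.insert(0, temp.pop())'
def pvRot (t : List Int) : List Int := (t.getLast?.getD 0) :: t.dropLast

theorem pvRot_length (t : List Int) (ht : t ≠ []) : (pvRot t).length = t.length := by
  have : t.length ≠ 0 := by simpa using ht
  simp [pvRot, List.length_dropLast]
  omega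

theorem pvRot_ne_nil (t : List Int) : pvRot t ≠ [] := by simp [pvRot]

theorem pvRot_pyGetD (t : List Int) (ht : t ≠ []) (j : Int) (h0 : 0 ≤ j)
    (h1 : j < (t.length : Int)) :
    PySem.List.pyGetD (pvRot t) j 0
      = PySem.List.pyGetD t (PySem.Int.mod (j - 1) (t.length : Int)) 0 := by
  have hm : 0 < t.length := List.length_pos_iff.mpr ht
  have hmpos : (0:Int) < (t.length : Int) := by exact_mod_cast hm
  rw [PySem.Int.mod_eq_emod_of_pos hmpos]
  by_cases hj : j = 0
  · subst hj
    have hed : (0 - 1 : Int) % (t.length : Int) = (t.length : Int) - 1 := by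
      have h2 : ((t.length : Int) - 1) % (t.length : Int) = (0 - 1) % (t.length : Int) := by
        rw [show ((t.length : Int)) - 1 = (0 - 1) + (t.length : Int) * 1 by ring,
            Int.add_mul_emod_self_left]
      rw [← h2]
      exact Int.emod_eq_of_lt (by omega) (by omega)
    rw [hed]
    rw [PySem.List.pyGetD_eq_getElem (pvRot t) 0 (by omega) (by rw [pvRot_length t ht]; exact hmpos)]
    rw [PySem.List.pyGetD_eq_getElem t 0 (by omega) (by omega)]
    have h3 : ((t.length : Int) - 1).toNat = t.length - 1 := by omega
    simp only [Int.toNat_zero, pvRot, List.getElem_cons_zero, h3]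
    rw [List.getLast?_eq_some_getLast ht]
    simp only [Option.getD_some]
    exact List.getLast_eq_getElem ht
  · have hed : (j - 1) % (t.length : Int) = j - 1 :=
      Int.emod_eq_of_lt (by omega) (by omega)
    rw [hed]
    rw [PySem.List.pyGetD_eq_getElem (pvRot t) 0 (by omega) (by rw [pvRot_length t ht]; omega)]
    rw [PySem.List.pyGetD_eq_getElem t 0 (by omega) (by omega)]
    have hk : j.toNat = (j - 1).toNat + 1 := by omega
    simp only [pvRot, hk, List.getElem_cons_succ, List.getElem_dropLast]

theorem pvRotIter_facts (a : List Int) (ha : a ≠ []) (k : Nat) :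
    (pvRot^[k] a).length = a.length ∧ pvRot^[k] a ≠ [] := by
  induction k with
  | zero => exact ⟨rfl, ha⟩
  | succ k ih =>
    rw [Function.iterate_succ_apply']
    exact ⟨by rw [pvRot_length _ ih.2, ih.1], pvRot_ne_nil _⟩

theorem pvRotIter_pyGetD (a : List Int) (ha : a ≠ []) (k : Nat) :
    ∀ (j : Int), 0 ≤ j → j < (a.length : Int) →
    PySem.List.pyGetD (pvRot^[k] a) j 0
      = PySem.List.pyGetD a (PySem.Int.mod (j - (k : Int)) (a.length : Int)) 0 := by
  have hm : 0 < a.length := List.length_pos_iff.mpr ha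
  have hmpos : (0:Int) < (a.length : Int) := by exact_mod_cast hm
  induction k with
  | zero =>
    intro j h0 h1
    rw [PySem.Int.mod_eq_emod_of_pos hmpos]
    have he : j - ((0:Nat):Int) = j := by push_cast; ring
    rw [he, Int.emod_eq_of_lt h0 h1]
    simp
  | succ k ih =>
    intro j h0 h1
    rw [Function.iterate_succ_apply']
    rw [pvRot_pyGetD _ (pvRotIter_facts a ha k).2 j
        (by simpa [(pvRotIter_facts a ha k).1] using h0)
        (by rw [(pvRotIter_facts a ha k).1]; exact h1)]
    rw [(pvRotIter_facts a ha k).1]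
    have hnn := PySem.Int.mod_nonneg (j - 1) hmpos
    have hlt := PySem.Int.mod_lt (j - 1) hmpos
    rw [ih (PySem.Int.mod (j - 1) (a.length : Int)) hnn hlt]
    rw [PySem.Int.mod_eq_emod_of_pos hmpos, PySem.Int.mod_eq_emod_of_pos hmpos,
        PySem.Int.mod_eq_emod_of_pos hmpos]
    have he : j - ((k+1 : Nat) : Int) = (j - 1) - (k : Int) := by push_cast; ring
    rw [he]
    rw [Int.sub_emod ((j-1) % (a.length : Int)) (k : Int), Int.sub_emod (j-1) (k : Int),
        Int.emod_emod_of_dvd _ dvd_rfl]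

theorem pv_foldl_append_singleton {α β : Type} (L : List α) (init : List β) (f : α → β) :
    L.foldl (fun acc x => acc ++ [f x]) init = init ++ L.map f := by
  induction L generalizing init with
  | nil => simp
  | cons x xs ih => simp [ih]

theorem r2_add_eq (out t : List Int) (n : Int) :
    r2_add out t n = (PySem.List.pyRange 0 n 1).map
      (fun i => PySem.Int.bxor (PySem.List.pyGetD out i 0) (PySem.List.pyGetD t i 0)) := by
  unfold r2_add
  rw [pv_foldl_append_singleton]
  simp

theorem pv_main (a b : List Int) (n : Int) (hn : 0 < n) (ha : a ≠ [])
    (hb : n ≤ (b.length : Int)) (hone : (1:Int) ∈ b.take n.toNat → n ≤ (a.length : Int)) :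
    ∀ k : Int, 0 ≤ k → k ≤ n →
    (PySem.List.pyRange 0 k 1).foldl (r2Step b n) (zeros_gen n, a)
      = ((PySem.List.pyRange 0 n 1).map (fun j =>
            ((PySem.List.pyRange 0 k 1).filter (fun i => PySem.List.pyGetD b i 0 == 1)).foldl
              (fun acc i => PySem.Int.bxor acc
                (PySem.List.pyGetD a (PySem.Int.mod (j - i) (a.length : Int)) 0)) 0),
         pvRot^[k.toNat] a) := by
  intro k hk
  induction k, hk using Int.le_induction with
  | base =>
    intro _
    rw [PySem.List.pyRange_one_eq_nil le_rfl]
    simp only [List.foldl_nil, List.filter_nil]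
    rw [Prod.ext_iff]
    refine ⟨?_, rfl⟩
    rw [List.map_const']
    simp [zeros_gen, PySem.List.length_pyRange_one]
  | succ k hk ih =>
    intro hkn
    have hkn' : k ≤ n := by omega
    rw [PySem.List.pyRange_one_succ_right hk]
    rw [List.foldl_append, ih hkn']
    have htnat : (k + 1).toNat = k.toNat + 1 := by omega
    rw [Prod.ext_iff]
    by_cases hbk : (PySem.List.pyGetD b k 0 == 1) = true
    · -- b[k] == 1 : r2_add fires
      have hbk1 : PySem.List.pyGetD b k 0 = 1 := by simpa using hbk
      have hkb : k < (b.length : Int) := by omega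
      have hmem : (1:Int) ∈ b.take n.toNat := by
        have hkk2 : k.toNat < b.length := by omega
        have hg : PySem.List.pyGetD b k 0 = b[k.toNat] :=
          PySem.List.pyGetD_eq_getElem _ _ hk hkb
        have hgt : (b.take n.toNat)[k.toNat]'(by simp; omega) = b[k.toNat] :=
          List.getElem_take
        rw [hg] at hbk1
        rw [hbk1] at hgt
        exact hgt ▸ List.getElem_mem _
      have hna : n ≤ (a.length : Int) := hone hmem
      refine ⟨?_, ?_⟩
      · simp only [List.foldl_cons, List.foldl_nil, r2Step, hbk, if_pos]
        rw [r2_add_eq]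
        rw [List.filter_append]
        simp only [List.filter_cons, hbk, List.filter_nil]
        apply List.map_congr_left
        intro j hj
        have hj' := (PySem.List.mem_pyRange_one).mp hj
        rw [List.foldl_append]
        congr 1
        · exact PySem.List.pyGetD_map_pyRange_of_nonneg _ _ _ _ hj'.1 hj'.2
        · rw [pvRotIter_pyGetD a ha k.toNat j hj'.1 (by omega)]
          congr 2
          omega
      · rw [htnat, Function.iterate_succ_apply']
        rfl
    · -- b[k] != 1
      refine ⟨?_, ?_⟩
      · simp only [List.foldl_cons, List.foldl_nil]
        simp only [r2Step, hbk]
        rw [List.filter_append]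
        simp [hbk]
      · rw [htnat, Function.iterate_succ_apply']
        rfl

-- ===== VERDICT (by name: the statement is the Claim_ definition above) =====
theorem r2_mul_spec : Claim_equal_r2_mul := by
  intro a b n _ hpre
  unfold Spec_r2_mul r2_mul r2_mul_alt
  by_cases hn : n ≤ 0
  · rw [PySem.List.pyRange_one_eq_nil hn]
    simp [zeros_gen, Int.toNat_of_nonpos hn]
  · have hn' : 0 < n := by omega
    rcases hpre with h | ⟨hb, ha, hone⟩
    · omega
    · rw [pv_main a b n hn' ha hb hone n (by omega) le_rfl]
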